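-- pv_equiv track=rewrite | github.com/mohankaran-03/ai-sports | exercise_engine.py | count_situps
-- ===== SOURCE A (Python) =====
-- def count_situps(hip_angles):
--     counter = 0
--     stage = None
--     for angle in hip_angles:
--         if angle < 100:
--             stage = "down"
--         if angle > 140 and stage == "down":
--             stage = "up"
--             counter += 1
--     return counter
-- ===== SOURCE B (Python) =====
-- def count_situps(hip_angles):
--     # Pass 1: tokenize angles into significant postures, skipping the 100..140 dead zone.
--     tokens = [("down" if a < 100 else "up") for a in hip_angles if a < 100 or a > 140]
--     # Pass 2: collapse consecutive equal tokens into runs.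
--     runs = []
--     for t in tokens:
--         if not runs or runs[-1] != t:
--             runs.append(t)
--     # Pass 3: count 'up' runs that directly follow a 'down' run.
--     prev = None
--     count = 0
--     for r in runs:
--         if r == "up" and prev == "down":
--             count += 1
--         prev = r
--     return count
-- ===== Notes on version B (the rewrite author's own statement) =====
-- stated objective: alternative
-- what changed: Replaced A's inline per-element two-branch state machine with a three-pass pipeline: tokenize angles to down/up (skipping the 100..140 dead zone), collapse consecutive equal tokens into runs, then count up-runs immediately preceded by a down-run.
import Mathlib
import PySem

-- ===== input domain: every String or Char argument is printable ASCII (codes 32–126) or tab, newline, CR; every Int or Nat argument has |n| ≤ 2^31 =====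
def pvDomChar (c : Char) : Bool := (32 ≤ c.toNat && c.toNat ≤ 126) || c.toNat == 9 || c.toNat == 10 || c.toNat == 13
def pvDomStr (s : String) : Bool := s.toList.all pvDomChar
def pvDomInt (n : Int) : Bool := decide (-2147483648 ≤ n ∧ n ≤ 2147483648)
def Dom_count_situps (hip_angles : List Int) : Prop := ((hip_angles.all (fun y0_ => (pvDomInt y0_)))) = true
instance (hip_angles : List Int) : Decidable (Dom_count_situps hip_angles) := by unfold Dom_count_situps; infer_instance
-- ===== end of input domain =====

-- B replaces A's inline state machine with a tokenize / collapse-runs / count-transitions pipeline (alternative decomposition, same cost).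


-- ===== PORT A =====
-- A's loop body (the two ifs over (counter, stage)), then the literal fold over the angles
def stepA (st : Int × Option String) (angle : Int) : Int × Option String :=
  let stage := if angle < 100 then some "down" else st.2
  if angle > 140 ∧ stage = some "down" then (st.1 + 1, some "up") else (st.1, stage)

def count_situps (hip_angles : List Int) : Int :=
  (hip_angles.foldl stepA (0, none)).1

-- ===== PORT B =====
-- pass 1 of Source B: the filtered token list
def csTokens (hip_angles : List Int) : List String :=
  hip_angles.filterMap (fun a =>
    if a < 100 ∨ a > 140 then some (if a < 100 then "down" else "up") else none)

-- pass 2 of Source B: collapse consecutive equal tokens by appending to runs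
def csRuns (tokens : List String) : List String :=
  tokens.foldl (fun runs t => if runs = [] ∨ runs.getLast? ≠ some t then runs ++ [t] else runs) []

-- pass 3 of Source B: scan the runs with (count, prev), counting up-after-down
def stepB (st : Int × Option String) (r : String) : Int × Option String :=
  (if r = "up" ∧ st.2 = some "down" then st.1 + 1 else st.1, some r)

def count_situps_alt (hip_angles : List Int) : Int :=
  ((csRuns (csTokens hip_angles)).foldl stepB (0, none)).1

-- ===== PRECONDITION & SPEC =====
def Spec_count_situps (hip_angles : List Int) (out : Int) : Prop := out = count_situps_alt hip_angles
instance (hip_angles : List Int) (out : Int) : Decidable (Spec_count_situps hip_angles out) := by unfold Spec_count_situps; infer_instance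

-- ===== CLAIM (what is proved, stated in full; the proofs are below) =====
def Claim_equal_count_situps : Prop := ∀ (hip_angles : List Int), Dom_count_situps hip_angles → Spec_count_situps hip_angles (count_situps hip_angles)

-- ===== LEMMAS AND PROOFS =====

-- recursive form of the run collapse (pass 2), parameterised by the previous token
def dedupFrom (p : Option String) : List String → List String
  | [] => []
  | t :: ts => if p = some t then dedupFrom p ts else t :: dedupFrom (some t) ts

-- recursive form of pass 3's count, parameterised by the previous token
def cntS (p : Option String) : List String → Int
  | [] => 0
  | t :: ts => (if t = "up" ∧ p = some "down" then 1 else 0) + cntS (some t) ts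

theorem csTokens_cons_down (a : Int) (l : List Int) (h : a < 100) :
    csTokens (a :: l) = "down" :: csTokens l := by
  simp [csTokens, h]

theorem csTokens_cons_up (a : Int) (l : List Int) (h1 : ¬ a < 100) (h2 : a > 140) :
    csTokens (a :: l) = "up" :: csTokens l := by
  simp [csTokens, h1, h2]

theorem csTokens_cons_mid (a : Int) (l : List Int) (h1 : ¬ a < 100) (h2 : ¬ a > 140) :
    csTokens (a :: l) = csTokens l := by
  simp [csTokens, h1, h2]

theorem csRuns_eq_dedup (ts : List String) : ∀ (rs : List String),
    ts.foldl (fun runs t => if runs = [] ∨ runs.getLast? ≠ some t then runs ++ [t] else runs) rs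
      = rs ++ dedupFrom rs.getLast? ts := by
  induction ts with
  | nil => intro rs; simp [dedupFrom]
  | cons t ts ih =>
    intro rs
    rw [List.foldl_cons]
    by_cases hlast : rs.getLast? = some t
    · have h : ¬ (rs = [] ∨ rs.getLast? ≠ some t) := by
        rintro (h1 | h2)
        · rw [h1] at hlast; simp at hlast
        · exact h2 hlast
      rw [if_neg h, ih]
      simp only [dedupFrom, if_pos hlast]
    · rw [if_pos (Or.inr hlast), ih]
      simp only [dedupFrom, if_neg hlast, List.getLast?_concat]
      simp

theorem cntS_congr (ts : List String) : ∀ (p q : Option String),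
    (p = some "down" ↔ q = some "down") → cntS p ts = cntS q ts := by
  induction ts with
  | nil => intro p q _; rfl
  | cons t ts ih =>
    intro p q h
    simp only [cntS]
    congr 1
    by_cases ht : t = "up"
    · by_cases hp : p = some "down"
      · rw [if_pos ⟨ht, hp⟩, if_pos ⟨ht, h.mp hp⟩]
      · rw [if_neg (fun hh => hp hh.2), if_neg (fun hh => hp (h.mpr hh.2))]
    · rw [if_neg (fun hh => ht hh.1), if_neg (fun hh => ht hh.1)]

theorem cntS_dedup (ts : List String) : ∀ (p : Option String),
    cntS p (dedupFrom p ts) = cntS p ts := by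
  induction ts with
  | nil => intro p; rfl
  | cons t ts ih =>
    intro p
    by_cases h : p = some t
    · simp only [dedupFrom, if_pos h, ih, cntS]
      have hne : ¬ (t = "up" ∧ p = some "down") := by
        rintro ⟨h1, h2⟩; subst h1; rw [h] at h2; simp at h2
      rw [if_neg hne, ← h]
      omega
    · simp only [dedupFrom, if_neg h, cntS, ih]

theorem scan_fst (rs : List String) : ∀ (c : Int) (p : Option String),
    (rs.foldl stepB (c, p)).1 = c + cntS p rs := by
  induction rs with
  | nil => intro c p; simp [cntS]
  | cons r rs ih =>
    intro c p
    simp only [List.foldl_cons, stepB, cntS, ih]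
    split_ifs <;> omega

theorem afold_eq (l : List Int) : ∀ (c : Int) (s : Option String),
    (l.foldl stepA (c, s)).1 = c + cntS s (csTokens l) := by
  induction l with
  | nil => intro c s; simp [csTokens, cntS]
  | cons a l ih =>
    intro c s
    rw [List.foldl_cons]
    by_cases h1 : a < 100
    · have h2 : ¬ a > 140 := by omega
      have hstep : stepA (c, s) a = (c, some "down") := by
        simp [stepA, h1, h2]
      rw [hstep, ih, csTokens_cons_down a l h1]
      have hne : ¬ (("down" : String) = "up" ∧ s = some "down") := by
        rintro ⟨hh, -⟩; exact absurd hh (by decide)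
      simp only [cntS, if_neg hne]
      omega
    · by_cases h2 : a > 140
      · rw [csTokens_cons_up a l h1 h2]
        by_cases h3 : s = some "down"
        · have hstep : stepA (c, s) a = (c + 1, some "up") := by
            simp [stepA, h1, h2, h3]
          rw [hstep, ih]
          have hcnt : cntS s ("up" :: csTokens l) = 1 + cntS (some "up") (csTokens l) := by
            simp only [cntS]
            rw [if_pos ⟨trivial, h3⟩]
          rw [hcnt]
          omega
        · have hstep : stepA (c, s) a = (c, s) := by
            simp [stepA, h1, h2, h3]
          rw [hstep, ih]
          simp only [cntS]
          rw [if_neg (fun hh => h3 hh.2),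
            cntS_congr (csTokens l) s (some "up")
              (by constructor
                  · intro hh; exact absurd hh h3
                  · intro hh; simp at hh)]
          omega
      · have hstep : stepA (c, s) a = (c, s) := by
          simp [stepA, h1, h2]
        rw [hstep, ih, csTokens_cons_mid a l h1 h2]

-- ===== VERDICT (by name: the statement is the Claim_ definition above) =====
theorem count_situps_spec : Claim_equal_count_situps := by
  intro l _
  unfold Spec_count_situps count_situps count_situps_alt csRuns
  rw [csRuns_eq_dedup, scan_fst, afold_eq l 0 none]
  simp [cntS_dedup]
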